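-- pv_equiv track=rewrite | github.com/tonezzz/chaba | services/assistance/jarvis-backend/jarvis/dialog/history.py | format_recent_dialog_for_context
-- ===== SOURCE A (Python) =====
-- from typing import Any, Optional
--
-- def format_recent_dialog_for_context(entries: list[dict[str, Any]], max_chars: int = 1200) -> str:
--     """Format recent dialog for context"""
--     if not entries:
--         return ""
--
--     lines = []
--     total_chars = 0
--
--     for entry in entries[-10:]:  # Last 10 entries
--         role = entry.get("role", "unknown")
--         text = entry.get("text", "")
--         if not text:
--             continue
--
--         line = f"{role.title()}: {text}"
--         if total_chars + len(line) > max_chars: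
--             break
--
--         lines.append(line)
--         total_chars += len(line)
--
--     return "\n".join(lines)
-- ===== SOURCE B (Python) =====
-- def format_recent_dialog_for_context(entries: list, max_chars: int = 1200) -> str:
--     """Format recent dialog for context"""
--     # Pass 1: all candidate lines from the last 10 entries (empty texts dropped).
--     lines = [f"{e.get('role', 'unknown').title()}: {t}"
--              for e in entries[-10:] if (t := e.get('text', ''))]
--     # Pass 2: running totals; keep the prefix whose cumulative length fits.
--     cum = 0
--     sums = [(cum := cum + len(l)) for l in lines]
--     k = len([s for s in sums if s <= max_chars])
--     return "\n".join(lines[:k])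
-- ===== Notes on version B (the rewrite author's own statement) =====
-- stated objective: alternative
-- what changed: Replaces A's single filter-accumulate-break loop with three separate passes: a comprehension building all candidate lines, a prefix-sum pass over their lengths, and a count of fitting prefix sums that selects the kept prefix before joining.
import Mathlib
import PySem

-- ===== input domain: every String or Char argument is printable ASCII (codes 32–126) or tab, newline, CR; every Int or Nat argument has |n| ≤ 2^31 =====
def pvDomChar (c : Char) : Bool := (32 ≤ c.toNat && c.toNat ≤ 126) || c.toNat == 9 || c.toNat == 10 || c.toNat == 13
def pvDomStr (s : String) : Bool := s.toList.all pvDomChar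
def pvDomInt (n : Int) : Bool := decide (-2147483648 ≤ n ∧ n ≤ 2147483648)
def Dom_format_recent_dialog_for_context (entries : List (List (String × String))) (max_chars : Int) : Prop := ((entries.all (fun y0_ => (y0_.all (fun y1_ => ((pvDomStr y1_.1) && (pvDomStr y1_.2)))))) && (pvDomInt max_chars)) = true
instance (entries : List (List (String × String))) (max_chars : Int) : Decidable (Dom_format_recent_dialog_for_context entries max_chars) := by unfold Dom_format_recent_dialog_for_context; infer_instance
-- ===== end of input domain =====

-- B rebuilds the same formatted context in separate passes (all candidate lines, then prefix
-- sums of their lengths, then a count-based prefix cut) instead of A's single break-loop;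
-- objective: alternative decomposition, same value on every input.


-- ===== PORT A =====
-- str.title(), ported by hand over the char list (exact for the ASCII domain: a letter is
-- uppercased after a non-letter, lowercased after a letter).
def pyTitleGo : Bool → List Char → List Char
  | _, [] => []
  | prev, c :: r =>
    let a := PySem.Chars.isalpha c
    (if a then (if prev then PySem.Chars.lowerChar c else PySem.Chars.upperChar c) else c)
      :: pyTitleGo a r

def pyTitle (s : String) : String := String.ofList (pyTitleGo false s.toList)

-- A's for-loop with break/continue, as structural recursion over the sliced entries.
def pvALoop (max_chars : Int) : List (List (String × String)) → List String → Int → List String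
  | [], lines, _ => lines
  | entry :: rest, lines, total =>
    let role := (PySem.Dict.mk entry).getD "role" "unknown"
    let text := (PySem.Dict.mk entry).getD "text" ""
    if text = "" then pvALoop max_chars rest lines total
    else
      let line := pyTitle role ++ ": " ++ text
      if max_chars < total + PySem.Str.len line then lines
      else pvALoop max_chars rest (lines ++ [line]) (total + PySem.Str.len line)

def format_recent_dialog_for_context (entries : List (List (String × String))) (max_chars : Int) : String :=
  if entries = [] then ""
  else PySem.Str.join "\n" (pvALoop max_chars (PySem.List.slice entries (some (-10)) none) [] 0)

-- ===== PORT B =====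
-- pass 1 of Source B: the comprehension building every candidate line
def pvBLines : List (List (String × String)) → List String
  | [] => []
  | e :: rest =>
    let t := (PySem.Dict.mk e).getD "text" ""
    if t = "" then pvBLines rest
    else (pyTitle ((PySem.Dict.mk e).getD "role" "unknown") ++ ": " ++ t) :: pvBLines rest

-- pass 2 of Source B: running totals of the line lengths
def pvBSums (cum : Int) : List String → List Int
  | [] => []
  | l :: r => (cum + PySem.Str.len l) :: pvBSums (cum + PySem.Str.len l) r

def format_recent_dialog_for_context_alt (entries : List (List (String × String))) (max_chars : Int) : String :=
  let lines := pvBLines (PySem.List.slice entries (some (-10)) none)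
  let sums := pvBSums 0 lines
  let k := (sums.filter (fun s => decide (s ≤ max_chars))).length
  PySem.Str.join "\n" (lines.take k)

-- ===== PRECONDITION & SPEC =====
def Spec_format_recent_dialog_for_context (entries : List (List (String × String))) (max_chars : Int) (out : String) : Prop := out = format_recent_dialog_for_context_alt entries max_chars
instance (entries : List (List (String × String))) (max_chars : Int) (out : String) : Decidable (Spec_format_recent_dialog_for_context entries max_chars out) := by unfold Spec_format_recent_dialog_for_context; infer_instance

-- ===== CLAIM (what is proved, stated in full; the proofs are below) =====
def Claim_equal_format_recent_dialog_for_context : Prop := ∀ (entries : List (List (String × String))) (max_chars : Int), Dom_format_recent_dialog_for_context entries max_chars → Spec_format_recent_dialog_for_context entries max_chars (format_recent_dialog_for_context entries max_chars)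

-- ===== LEMMAS AND PROOFS =====
-- A's break-loop, rephrased over the already-built list of candidate lines.
def pvATake (max_chars : Int) : List String → List String → Int → List String
  | [], lines, _ => lines
  | l :: r, lines, total =>
    if max_chars < total + PySem.Str.len l then lines
    else pvATake max_chars r (lines ++ [l]) (total + PySem.Str.len l)

theorem pvALoop_eq_pvATake (mc : Int) (es : List (List (String × String))) :
    ∀ acc total, pvALoop mc es acc total = pvATake mc (pvBLines es) acc total := by
  induction es with
  | nil => intro acc total; rfl
  | cons e rest ih =>
    intro acc total
    simp only [pvALoop, pvBLines]
    by_cases h : (PySem.Dict.mk e).getD "text" "" = ""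
    · simp only [if_pos h]; exact ih _ _
    · simp only [if_neg h, pvATake]
      split_ifs
      · rfl
      · exact ih _ _

theorem pvBSums_ge : ∀ (ls : List String) (c : Int), (∀ x ∈ pvBSums c ls, c ≤ x) := by
  intro ls
  induction ls with
  | nil => intro c x hx; simp [pvBSums] at hx
  | cons l r ih =>
    intro c x hx
    have hl : 0 ≤ PySem.Str.len l := by simp [PySem.Str.len_eq]
    simp only [pvBSums, List.mem_cons] at hx
    rcases hx with h | h
    · omega
    · have := ih (c + PySem.Str.len l) x h
      omega

theorem pvATake_eq_take (mc : Int) : ∀ (ls : List String) (acc : List String) (c : Int),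
    pvATake mc ls acc c = acc ++ ls.take ((pvBSums c ls).filter (fun s => decide (s ≤ mc))).length := by
  intro ls
  induction ls with
  | nil => intro acc c; simp [pvATake, pvBSums]
  | cons l r ih =>
    intro acc c
    rw [pvATake, pvBSums, List.filter_cons]
    by_cases h : c + PySem.Str.len l ≤ mc
    · have h' : ¬ mc < c + PySem.Str.len l := by omega
      simp only [h, decide_true, if_true, if_neg h', List.length_cons, List.take_succ_cons, ih]
      simp
    · have h' : mc < c + PySem.Str.len l := by omega
      have hfil : (pvBSums (c + PySem.Str.len l) r).filter (fun s => decide (s ≤ mc)) = [] := by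
        rw [List.filter_eq_nil_iff]
        intro x hx
        have := pvBSums_ge r (c + PySem.Str.len l) x hx
        simp only [decide_eq_true_eq]
        omega
      simp only [PySem.Str.len_eq, String.length_toList] at h h' hfil
      simp [h, h', hfil]

-- ===== VERDICT (by name: the statement is the Claim_ definition above) =====
theorem format_recent_dialog_for_context_spec : Claim_equal_format_recent_dialog_for_context := by
  intro entries max_chars _
  show _ = _
  unfold format_recent_dialog_for_context format_recent_dialog_for_context_alt
  by_cases h : entries = []
  · subst h
    rfl
  · rw [if_neg h, pvALoop_eq_pvATake, pvATake_eq_take]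
    simp
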